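-- pv_equiv track=rewrite | github.com/ghostrider77/adventOfCode-2017 | src/day_17a.py | get_spinlock_value
-- ===== SOURCE A (Python) =====
-- def get_spinlock_value(step_size, nr_rounds):
--     buffer = [0]
--     position = 0
--     for n in range(1, nr_rounds+1):
--         position = (position + step_size) % n + 1
--         buffer.insert(position, n)
--
--     position = (position + 1) % n
--     return buffer[position]
-- ===== SOURCE B (Python) =====
-- def get_spinlock_value(step_size, nr_rounds):
--     # Record only the insertion positions (O(n)), then recover the value that
--     # ends up at the queried index by a single backward pass -- no list.insert.
--     positions = []
--     pos = 0
--     for n in range(1, nr_rounds + 1):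
--         pos = (pos + step_size) % n + 1
--         positions.append(pos)
--     q = (pos + 1) % nr_rounds
--     for n, p in zip(range(nr_rounds, 0, -1), reversed(positions)):
--         if q == p:
--             return n
--         if q > p:
--             q -= 1
--     return 0
-- ===== Notes on version B (the rewrite author's own statement) =====
-- stated objective: faster
-- what changed: B never materialises the circular buffer: it records only the per-round insertion positions and then recovers the element at the queried index by one backward pass over those positions, replacing A's O(n) list.insert per round.
import Mathlib
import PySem

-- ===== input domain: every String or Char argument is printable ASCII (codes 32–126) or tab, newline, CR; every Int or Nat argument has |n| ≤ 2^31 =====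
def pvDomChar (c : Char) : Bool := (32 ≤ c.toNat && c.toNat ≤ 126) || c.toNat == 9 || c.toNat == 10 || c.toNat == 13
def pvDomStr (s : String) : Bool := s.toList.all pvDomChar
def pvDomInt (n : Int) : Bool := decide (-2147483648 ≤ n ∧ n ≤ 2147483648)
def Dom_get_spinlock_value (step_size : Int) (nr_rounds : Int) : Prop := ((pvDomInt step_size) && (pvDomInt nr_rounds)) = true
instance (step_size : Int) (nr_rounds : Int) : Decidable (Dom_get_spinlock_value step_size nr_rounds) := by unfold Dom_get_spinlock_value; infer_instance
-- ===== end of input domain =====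

-- B changes the algorithm (positions only + one backward pass, no buffer); equivalence proved on nr_rounds ≥ 1.

-- ===== PORT A =====
-- state: (buffer, position, n) — n carries the loop variable, read after the loop as in Python
def get_spinlock_value (step_size : Int) (nr_rounds : Int) : Int :=
  let st := (PySem.List.pyRange 1 (nr_rounds + 1) 1).foldl
      (fun (st : List Int × Int × Int) n =>
        let p := PySem.Int.mod (st.2.1 + step_size) n + 1
        (PySem.List.insert st.1 p n, p, n))
      ([0], 0, 0)
  let pos := PySem.Int.mod (st.2.1 + 1) st.2.2
  PySem.List.pyGetD st.1 pos 0   -- index always in range under Pre_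

-- ===== PORT B =====
-- backward pass over the reversed positions list (Python: zip(range(nr,0,-1), reversed(positions)))
def spinBack : List Int → Int → Int → Int
  | [], _, _ => 0
  | p :: rest, n, q =>
    if q = p then n
    else if q > p then spinBack rest (n - 1) (q - 1)
    else spinBack rest (n - 1) q

def get_spinlock_value_alt (step_size : Int) (nr_rounds : Int) : Int :=
  let st := (PySem.List.pyRange 1 (nr_rounds + 1) 1).foldl
      (fun (st : Int × List Int) n =>
        let p := PySem.Int.mod (st.1 + step_size) n + 1
        (p, p :: st.2))            -- cons-accumulation = append then reversed(positions)
      (0, [])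
  let q := PySem.Int.mod (st.1 + 1) nr_rounds
  spinBack st.2 nr_rounds q

-- ===== PRECONDITION & SPEC =====
-- A raises (NameError: 'n' unbound after an empty loop) whenever nr_rounds < 1; exactly those inputs are excluded.
def Pre_get_spinlock_value (step_size : Int) (nr_rounds : Int) : Prop := 1 ≤ nr_rounds
instance (step_size : Int) (nr_rounds : Int) : Decidable (Pre_get_spinlock_value step_size nr_rounds) := by unfold Pre_get_spinlock_value; infer_instance
def pvWitness_get_spinlock_value : Int × Int := (3, 9)

def Spec_get_spinlock_value (step_size : Int) (nr_rounds : Int) (out : Int) : Prop := out = get_spinlock_value_alt step_size nr_rounds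
instance (step_size : Int) (nr_rounds : Int) (out : Int) : Decidable (Spec_get_spinlock_value step_size nr_rounds out) := by unfold Spec_get_spinlock_value; infer_instance

-- ===== CLAIM (what is proved, stated in full; the proofs are below) =====
def Claim_equal_get_spinlock_value : Prop := ∀ (step_size : Int) (nr_rounds : Int), Dom_get_spinlock_value step_size nr_rounds → Pre_get_spinlock_value step_size nr_rounds → Spec_get_spinlock_value step_size nr_rounds (get_spinlock_value step_size nr_rounds)

-- ===== LEMMAS AND PROOFS =====

-- position after round n (posA s 0 = initial position 0)
def posA (s : Int) : Nat → Int
  | 0 => 0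
  | n + 1 => PySem.Int.mod (posA s n + s) ((n : Int) + 1) + 1

-- A's buffer after n rounds
def bufA (s : Int) : Nat → List Int
  | 0 => [0]
  | n + 1 => PySem.List.insert (bufA s n) (posA s (n + 1)) ((n : Int) + 1)

-- B's reversed positions list after n rounds
def revP (s : Int) : Nat → List Int
  | 0 => []
  | n + 1 => posA s (n + 1) :: revP s n

theorem posA_bounds (s : Int) (n : Nat) : 1 ≤ posA s (n + 1) ∧ posA s (n + 1) ≤ (n : Int) + 1 := by
  have h1 : (0 : Int) < (n : Int) + 1 := by positivity
  have h2 := PySem.Int.mod_nonneg (posA s n + s) h1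
  have h3 := PySem.Int.mod_lt (posA s n + s) h1
  constructor
  · simp only [posA]; omega
  · simp only [posA]; omega

theorem bufA_length (s : Int) (n : Nat) : (bufA s n).length = n + 1 := by
  induction n with
  | zero => simp [bufA]
  | succ k ih =>
    have hb := posA_bounds s k
    have hcast : posA s (k + 1) = ((posA s (k + 1)).toNat : Int) := by omega
    have hle : (posA s (k + 1)).toNat ≤ (bufA s k).length := by omega
    rw [bufA, hcast, PySem.List.insert_natCast _ _ _ hle]
    simp
    omega

-- getD of an insert written as take ++ v :: drop
theorem getD_insert_split (xs : List Int) (i j : Nat) (v d : Int) (hi : i ≤ xs.length) :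
    (xs.take i ++ v :: xs.drop i).getD j d =
      if j = i then v else if j < i then xs.getD j d else xs.getD (j - 1) d := by
  induction xs generalizing i j with
  | nil =>
    have : i = 0 := by simpa using hi
    subst this
    cases j <;> simp [List.getD]
  | cons a xs ih =>
    cases i with
    | zero =>
      cases j <;> simp [List.getD]
    | succ i' =>
      cases j with
      | zero => simp [List.getD]
      | succ j' =>
        have hi' : i' ≤ xs.length := by simpa using hi
        have := ih i' j' hi'
        simp only [List.take_succ_cons, List.drop_succ_cons, List.cons_append, List.getD_cons_succ]
        rw [this]
        by_cases h1 : j' = i'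
        · simp [h1]
        · by_cases h2 : j' < i'
          · rw [if_neg h1, if_pos h2, if_neg (show ¬ j' + 1 = i' + 1 by omega),
              if_pos (show j' + 1 < i' + 1 by omega)]
          · have hgt : i' < j' := by omega
            obtain ⟨m, rfl⟩ : ∃ m, j' = m + 1 := ⟨j' - 1, by omega⟩
            rw [if_neg h1, if_neg h2, if_neg (show ¬ m + 1 + 1 = i' + 1 by omega),
              if_neg (show ¬ m + 1 + 1 < i' + 1 by omega)]
            simp

-- main invariant: looking up index q in A's buffer = B's backward pass
theorem lookup_eq_spinBack (s : Int) (n : Nat) (q : Int) (h0 : 0 ≤ q) (hn : q ≤ (n : Int)) :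
    PySem.List.pyGetD (bufA s n) q 0 = spinBack (revP s n) (n : Int) q := by
  induction n generalizing q with
  | zero =>
    have : q = 0 := by omega
    subst this
    simp [bufA, revP, spinBack, PySem.List.pyGetD_zero_cons]
  | succ k ih =>
    have hb := posA_bounds s k
    set p := posA s (k + 1) with hp
    have hcast : p = ((p.toNat : Int)) := by omega
    have hle : p.toNat ≤ (bufA s k).length := by
      have := bufA_length s k; omega
    have hbuf : bufA s (k + 1) = (bufA s k).take p.toNat ++ ((k : Int) + 1) :: (bufA s k).drop p.toNat := by
      rw [bufA, ← hp, hcast, PySem.List.insert_natCast _ _ _ hle]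
      simp only [Int.toNat_natCast]
    have hlen1 : (bufA s (k + 1)).length = k + 2 := bufA_length s (k + 1)
    have hqlt : q < ((bufA s (k + 1)).length : Int) := by omega
    rw [PySem.List.pyGetD_eq_getElem _ 0 h0 hqlt]
    have hget : (bufA s (k + 1))[q.toNat] = (bufA s (k + 1)).getD q.toNat 0 := by
      rw [List.getD_eq_getElem _ _ (by omega)]
    rw [hget, hbuf, getD_insert_split _ _ _ _ _ hle]
    have hrev : revP s (k + 1) = p :: revP s k := rfl
    rw [hrev]
    show _ = spinBack (p :: revP s k) ((k : Int) + 1) q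
    rw [spinBack]
    by_cases h1 : q = p
    · simp [h1]
    · have hne : ¬ q.toNat = p.toNat := by omega
      by_cases h2 : q < p
      · have hlt : q.toNat < p.toNat := by omega
        have hqk : q ≤ (k : Int) := by omega
        rw [if_neg hne, if_pos hlt, if_neg h1, if_neg (by omega : ¬ q > p)]
        rw [show ((k : Int) + 1 - 1) = (k : Int) by ring]
        have := ih q h0 hqk
        rw [PySem.List.pyGetD_eq_getElem _ 0 h0 (by have := bufA_length s k; omega)] at this
        rw [List.getD_eq_getElem _ _ (by have := bufA_length s k; omega)]
        rw [← this]
      · have hgt : p < q := by omega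
        have hq1 : (0 : Int) ≤ q - 1 := by omega
        have hq1k : q - 1 ≤ (k : Int) := by omega
        rw [if_neg hne, if_neg (by omega : ¬ q.toNat < p.toNat), if_neg h1, if_pos (by omega : q > p)]
        rw [show ((k : Int) + 1 - 1) = (k : Int) by ring]
        have := ih (q - 1) hq1 hq1k
        rw [PySem.List.pyGetD_eq_getElem _ 0 hq1 (by have := bufA_length s k; omega)] at this
        rw [List.getD_eq_getElem _ _ (by have := bufA_length s k; omega)]
        rw [← this]
        congr 1
        omega

-- characterisation of A's fold
theorem foldA_eq (s : Int) (k : Nat) :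
    (PySem.List.pyRange 1 ((k : Int) + 1) 1).foldl
      (fun (st : List Int × Int × Int) n =>
        let p := PySem.Int.mod (st.2.1 + s) n + 1
        (PySem.List.insert st.1 p n, p, n))
      ([0], 0, 0) = (bufA s k, posA s k, (k : Int)) := by
  induction k with
  | zero => simp [PySem.List.pyRange_one_eq_nil, bufA, posA]
  | succ k ih =>
    have hsplit : PySem.List.pyRange 1 ((k : Int) + 1 + 1) 1
        = PySem.List.pyRange 1 ((k : Int) + 1) 1 ++ [(k : Int) + 1] := by
      exact_mod_cast PySem.List.pyRange_one_succ_right (show (1:Int) ≤ (k : Int) + 1 by omega)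
    push_cast
    rw [hsplit, List.foldl_append, ih]
    simp [bufA, posA]

-- characterisation of B's fold
theorem foldB_eq (s : Int) (k : Nat) :
    (PySem.List.pyRange 1 ((k : Int) + 1) 1).foldl
      (fun (st : Int × List Int) n =>
        let p := PySem.Int.mod (st.1 + s) n + 1
        (p, p :: st.2))
      (0, []) = (posA s k, revP s k) := by
  induction k with
  | zero => simp [PySem.List.pyRange_one_eq_nil, posA, revP]
  | succ k ih =>
    have hsplit : PySem.List.pyRange 1 ((k : Int) + 1 + 1) 1
        = PySem.List.pyRange 1 ((k : Int) + 1) 1 ++ [(k : Int) + 1] := by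
      exact_mod_cast PySem.List.pyRange_one_succ_right (show (1:Int) ≤ (k : Int) + 1 by omega)
    push_cast
    rw [hsplit, List.foldl_append, ih]
    simp [posA, revP]

-- ===== VERDICT (by name: the statement is the Claim_ definition above) =====
theorem get_spinlock_value_spec : Claim_equal_get_spinlock_value := by
  intro s r _ hpre
  have hr : (1 : Int) ≤ r := hpre
  obtain ⟨k, hk⟩ : ∃ k : Nat, r = (k : Int) + 1 := ⟨(r - 1).toNat, by omega⟩
  subst hk
  unfold Spec_get_spinlock_value get_spinlock_value get_spinlock_value_alt
  rw [show ((k : Int) + 1 + 1) = (((k + 1 : Nat) : Int) + 1) by push_cast; ring]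
  rw [foldA_eq s (k + 1), foldB_eq s (k + 1)]
  simp only
  set q := PySem.Int.mod (posA s (k + 1) + 1) ((k + 1 : Nat) : Int) with hq
  have hpos : (0 : Int) < ((k + 1 : Nat) : Int) := by positivity
  have h0 : 0 ≤ q := PySem.Int.mod_nonneg _ hpos
  have h1 : q < ((k + 1 : Nat) : Int) := PySem.Int.mod_lt _ hpos
  rw [lookup_eq_spinBack s (k + 1) q h0 (by omega)]
  rw [hq]
  norm_cast
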